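-- pv_equiv track=rewrite | github.com/selynna/liquid-hacks | backend/hello/views.py | combat_calculation
-- ===== SOURCE A (Python) =====
-- def combat_calculation(kda: list):
--     # [kills, deaths, assists]
--     score = 0
--     for i in range(3):
--         if i == 0:
--             score += 30*kda[i]
--         elif i == 1:
--             score += -5*kda[i]
--         elif i == 2:
--             score += 10*kda[i]
--     return score
-- ===== SOURCE B (Python) =====
-- WEIGHTS = (30, -5, 10)
--
-- def combat_calculation(kda: list):
--     # recursive dot product against a weight table (no branch dispatch, no loop)
--     def dot(i):
--         if i == len(WEIGHTS):
--             return 0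
--         return WEIGHTS[i] * kda[i] + dot(i + 1)
--     return dot(0)
-- ===== Notes on version B (the rewrite author's own statement) =====
-- stated objective: alternative
-- what changed: Replaces the range(3) loop with if/elif coefficient dispatch by a table-driven recursive dot product of kda against a WEIGHTS tuple, built back from the base case, with no branching on the index.
import Mathlib
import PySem

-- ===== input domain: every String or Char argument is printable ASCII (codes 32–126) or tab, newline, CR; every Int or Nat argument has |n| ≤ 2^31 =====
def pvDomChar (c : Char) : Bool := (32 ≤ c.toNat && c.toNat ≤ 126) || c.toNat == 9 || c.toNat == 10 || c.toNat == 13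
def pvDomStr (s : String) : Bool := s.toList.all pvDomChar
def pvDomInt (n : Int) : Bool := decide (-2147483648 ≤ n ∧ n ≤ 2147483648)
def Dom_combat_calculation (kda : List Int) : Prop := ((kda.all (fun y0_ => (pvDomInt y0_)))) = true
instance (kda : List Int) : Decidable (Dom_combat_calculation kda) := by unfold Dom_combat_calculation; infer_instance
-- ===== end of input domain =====

-- B replaces A's range(3) loop with if/elif dispatch by a table-driven recursive dot product against a WEIGHTS tuple (alternative decomposition).


-- ===== PORT A =====
-- literal port of A's range(3) loop; kda[i] via pyGet? (none = IndexError, excluded by Pre_)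
def combat_calculation (kda : List Int) : Int :=
  (PySem.List.pyRange 0 3 1).foldl (fun score i =>
    if i == 0 then score + 30 * (PySem.List.pyGet? kda i).getD 0
    else if i == 1 then score + (-5) * (PySem.List.pyGet? kda i).getD 0
    else if i == 2 then score + 10 * (PySem.List.pyGet? kda i).getD 0
    else score) 0

-- ===== PORT B =====
-- the WEIGHTS table
def pvWeights : List Int := [30, -5, 10]
-- the inner recursive 'dot'; Python tests 'i == len(WEIGHTS)', written here as '3 ≤ i'
-- for termination — identical on every index the recursion reaches (0,1,2,3)
def pvDot (kda : List Int) (i : Nat) : Int :=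
  if 3 ≤ i then 0
  else (PySem.List.pyGet? pvWeights (i : Int)).getD 0
        * (PySem.List.pyGet? kda (i : Int)).getD 0 + pvDot kda (i + 1)
termination_by 3 - i

def combat_calculation_alt (kda : List Int) : Int := pvDot kda 0

-- ===== PRECONDITION & SPEC =====
-- A raises IndexError on lists with fewer than 3 elements; Pre_ excludes exactly those.
def Pre_combat_calculation (kda : List Int) : Prop := 3 ≤ kda.length
instance (kda : List Int) : Decidable (Pre_combat_calculation kda) := by unfold Pre_combat_calculation; infer_instance
def pvWitness_combat_calculation : List Int := [3, 2, 5]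

def Spec_combat_calculation (kda : List Int) (out : Int) : Prop := out = combat_calculation_alt kda
instance (kda : List Int) (out : Int) : Decidable (Spec_combat_calculation kda out) := by unfold Spec_combat_calculation; infer_instance

-- ===== CLAIM (what is proved, stated in full; the proofs are below) =====
def Claim_equal_combat_calculation : Prop := ∀ (kda : List Int), Dom_combat_calculation kda → Pre_combat_calculation kda → Spec_combat_calculation kda (combat_calculation kda)

-- ===== LEMMAS AND PROOFS =====

-- ===== VERDICT =====
theorem combat_calculation_spec : Claim_equal_combat_calculation := by
  intro kda _ hpre
  match kda, hpre with
  | a :: b :: c :: rest, _ =>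
    show Spec_combat_calculation _ _
    unfold Spec_combat_calculation combat_calculation combat_calculation_alt
    rw [pvDot, pvDot, pvDot, pvDot]
    have h0 : (0:Int) ≤ 2 + (rest.length : Int) := by positivity
    have h1 : (0:Int) ≤ 1 + (rest.length : Int) := by positivity
    have h2 : (2:Int) ≤ 2 + (rest.length : Int) := by omega
    simp [PySem.List.pyRange, PySem.List.pyGet?, PySem.List.pyIdx?, List.range_succ, pvWeights]
    ring
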